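-- pv_equiv track=rewrite | github.com/jbsmith22/songbook-splitter | flatten_all_s3_structure.py | determine_target_book_folder
-- ===== SOURCE A (Python) =====
-- def determine_target_book_folder(artist, all_keys_for_artist):
--     """
--     Determine the preferred book folder name for an artist.
--     Prefer: <Artist> - <Book> format over just <Book>
--     """
--     book_folders = set()
--
--     for key in all_keys_for_artist:
--         parts = key.split('/')
--         if len(parts) >= 2:
--             book_folder = parts[1]
--             book_folders.add(book_folder)
--
--     # Prefer folders with " - " (Artist - Book format)
--     preferred = [f for f in book_folders if ' - ' in f and f.lower().startswith(artist.lower())]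
--
--     if preferred:
--         # If multiple, pick the shortest (likely the main one)
--         return sorted(preferred, key=len)[0]
--
--     # Otherwise, pick any folder with " - "
--     with_dash = [f for f in book_folders if ' - ' in f]
--     if with_dash:
--         return sorted(with_dash, key=len)[0]
--
--     # Fallback: pick the most common one
--     if book_folders:
--         return sorted(book_folders)[0]
--
--     return None
-- ===== SOURCE B (Python) =====
-- def determine_target_book_folder(artist, all_keys_for_artist):
--     """
--     Determine the preferred book folder name for an artist.
--     Single priority-keyed scan over the deduplicated folder names instead of
--     three filter+sort passes.
--     """
--     folders = dict.fromkeys(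
--         key.split('/')[1] for key in all_keys_for_artist
--         if len(key.split('/')) >= 2)
--
--     if not folders:
--         return None
--
--     artist_l = artist.lower()
--
--     def keyfn(f):
--         if ' - ' in f:
--             if f.lower().startswith(artist_l):
--                 return (0, len(f))
--             return (1, len(f))
--         return (2, f)
--
--     return min(folders, key=keyfn)
-- ===== Notes on version B (the rewrite author's own statement) =====
-- stated objective: alternative
-- what changed: Replaces A's three filter-then-sort-then-index passes over the folder set with one dedup pass and a single min() scan under a composite priority key (category, then length or name); B iterates an insertion-ordered dedup instead of a hash-ordered set, so it is deterministic.
-- outside the precondition, e.g. on determine_target_book_folder('zz', ['r/a - b/f', 'r/e - f/f']): A returns 'e - f', B returns 'a - b'; on determine_target_book_folder('a', ['r/a - c/f', 'r/a - b/f']): A returns 'a - b', B returns 'a - c'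
import Mathlib
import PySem

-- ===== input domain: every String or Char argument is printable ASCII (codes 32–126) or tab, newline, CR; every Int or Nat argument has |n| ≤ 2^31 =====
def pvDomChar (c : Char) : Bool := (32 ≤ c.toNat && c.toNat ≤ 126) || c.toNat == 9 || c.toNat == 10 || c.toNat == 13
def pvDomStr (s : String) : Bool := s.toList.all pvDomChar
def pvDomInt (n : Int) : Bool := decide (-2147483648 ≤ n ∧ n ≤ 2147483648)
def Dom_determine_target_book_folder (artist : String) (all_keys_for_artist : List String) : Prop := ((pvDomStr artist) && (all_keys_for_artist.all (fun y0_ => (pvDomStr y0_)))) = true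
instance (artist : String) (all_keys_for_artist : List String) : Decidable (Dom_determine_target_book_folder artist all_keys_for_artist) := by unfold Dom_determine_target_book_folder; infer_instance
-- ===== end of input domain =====

-- B replaces A's three filter+sort+index passes by one min() scan under a composite priority key (alternative decomposition, not claimed faster).
-- Python's set iteration order (hash order) is modelled as insertion order; under Pre_ the results are order-independent.
-- key.split('/') with the nonempty separator "/" never raises: PySem.Str.split? is `some` there, so `.getD []` is exact.

-- ===== PORT A =====
def determine_target_book_folder (artist : String) (all_keys_for_artist : List String) : Option String :=
  let book_folders : PySem.Set String :=
    all_keys_for_artist.foldl (fun s key =>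
      let parts := (PySem.Str.split? key "/").getD []
      if 2 ≤ parts.length then PySem.Set.add s (parts.getD 1 "") else s) PySem.Set.empty
  let preferred := book_folders.filter (fun f =>
    PySem.Str.isIn " - " f && PySem.Str.startswith (PySem.Str.lower f) (PySem.Str.lower artist))
  if preferred ≠ [] then
    (PySem.List.sorted preferred (fun f => PySem.Str.len f) false).head?
  else
    let with_dash := book_folders.filter (fun f => PySem.Str.isIn " - " f)
    if with_dash ≠ [] then
      (PySem.List.sorted with_dash (fun f => PySem.Str.len f) false).head?
    else if book_folders ≠ [] then
      (PySem.List.sorted book_folders (fun f => f) false).head?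
    else none

-- ===== PORT B =====
-- B-side helpers: keyfn's category and the tuple-key strict comparison keyfn(f) < keyfn(g)
def pvCat (artist_l : String) (f : String) : Nat :=
  if PySem.Str.isIn " - " f then
    (if PySem.Str.startswith (PySem.Str.lower f) artist_l then 0 else 1)
  else 2

def pvKeyLt (artist_l : String) (f g : String) : Bool :=
  if pvCat artist_l f = pvCat artist_l g then
    (if pvCat artist_l f = 2 then decide (f < g) else decide (PySem.Str.len f < PySem.Str.len g))
  else decide (pvCat artist_l f < pvCat artist_l g)

def determine_target_book_folder_alt (artist : String) (all_keys_for_artist : List String) : Option String :=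
  let folders := PySem.List.dedup
    ((all_keys_for_artist.filter (fun key => 2 ≤ ((PySem.Str.split? key "/").getD []).length)).map
      (fun key => ((PySem.Str.split? key "/").getD []).getD 1 ""))
  match folders with
  | [] => none
  | x :: t => some (t.foldl (fun best y => if pvKeyLt (PySem.Str.lower artist) y best then y else best) x)

-- ===== PRECONDITION & SPEC =====
-- helpers naming the folder list, A's two filtered lists, and "the minimal-length element is unique"
def pvFolders (keys : List String) : List String :=
  PySem.List.dedup
    ((keys.filter (fun key => 2 ≤ ((PySem.Str.split? key "/").getD []).length)).map
      (fun key => ((PySem.Str.split? key "/").getD []).getD 1 ""))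

def pvP (artist : String) (L : List String) : List String :=
  L.filter (fun f => PySem.Str.isIn " - " f && PySem.Str.startswith (PySem.Str.lower f) (PySem.Str.lower artist))

def pvW (L : List String) : List String :=
  L.filter (fun f => PySem.Str.isIn " - " f)

def pvUniqMin (xs : List String) : Prop :=
  ∀ f ∈ xs, ∀ g ∈ xs,
    (∀ h ∈ xs, PySem.Str.len f ≤ PySem.Str.len h) →
    (∀ h ∈ xs, PySem.Str.len g ≤ PySem.Str.len h) → f = g

-- Pre_ excludes inputs where the winning " - " category holds two distinct folders tied at minimal length:
-- there A's pick among the tied names follows Python's set-iteration (hash) order, an accident of A's implementation.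
def Pre_determine_target_book_folder (artist : String) (all_keys_for_artist : List String) : Prop :=
  (pvP artist (pvFolders all_keys_for_artist) ≠ [] → pvUniqMin (pvP artist (pvFolders all_keys_for_artist))) ∧
  (pvP artist (pvFolders all_keys_for_artist) = [] → pvUniqMin (pvW (pvFolders all_keys_for_artist)))
instance (artist : String) (all_keys_for_artist : List String) : Decidable (Pre_determine_target_book_folder artist all_keys_for_artist) := by
  unfold Pre_determine_target_book_folder pvUniqMin; infer_instance

def pvWitness_determine_target_book_folder : String × List String :=
  ("Adele", ["Adele/Adele - 21/x.pdf", "Adele/Misc/y.pdf"])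

def Spec_determine_target_book_folder (artist : String) (all_keys_for_artist : List String) (out : Option String) : Prop := out = determine_target_book_folder_alt artist all_keys_for_artist
instance (artist : String) (all_keys_for_artist : List String) (out : Option String) : Decidable (Spec_determine_target_book_folder artist all_keys_for_artist out) := by unfold Spec_determine_target_book_folder; infer_instance

-- ===== CLAIM (what is proved, stated in full; the proofs are below) =====
def Claim_equal_determine_target_book_folder : Prop := ∀ (artist : String) (all_keys_for_artist : List String), Dom_determine_target_book_folder artist all_keys_for_artist → Pre_determine_target_book_folder artist all_keys_for_artist → Spec_determine_target_book_folder artist all_keys_for_artist (determine_target_book_folder artist all_keys_for_artist)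

-- ===== LEMMAS AND PROOFS =====

-- A's set-building loop builds exactly pvFolders (the dedup of the guarded parts[1] list)
lemma pvFoldA_eq (keys : List String) :
    keys.foldl (fun s key =>
      let parts := (PySem.Str.split? key "/").getD []
      if 2 ≤ parts.length then PySem.Set.add s (parts.getD 1 "") else s) PySem.Set.empty
    = pvFolders keys := by
  unfold pvFolders
  rw [PySem.List.dedup_eq_ofList, PySem.Set.ofList_eq_foldl, List.foldl_map,
      ← PySem.List.foldl_ite_eq_foldl_filter
        (p := fun key => 2 ≤ ((PySem.Str.split? key "/").getD []).length)]
  rfl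

-- the composite key as one lexicographic measure: pvKeyLt compares pvMu
def pvMu (al f : String) : ℕ ×ₗ (ℤ ×ₗ String) :=
  toLex (pvCat al f, toLex (if pvCat al f = 2 then ((0 : ℤ), f) else (PySem.Str.len f, "")))

lemma pvKeyLt_eq (al f g : String) : pvKeyLt al f g = decide (pvMu al f < pvMu al g) := by
  unfold pvKeyLt pvMu
  by_cases h : pvCat al f = pvCat al g
  · rw [if_pos h, h]
    by_cases h2 : pvCat al g = 2
    · rw [if_pos h2, if_pos h2, if_pos h2]
      simp [Prod.Lex.lt_iff]
    · rw [if_neg h2, if_neg h2, if_neg h2]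
      simp [Prod.Lex.lt_iff]
  · rw [if_neg h]
    simp [Prod.Lex.lt_iff, h]

-- the min() scan returns a member whose key is minimal
lemma pvMinFold_spec (al : String) (t : List String) (x : String) :
    (t.foldl (fun best y => if pvKeyLt al y best then y else best) x ∈ x :: t) ∧
    (∀ y ∈ x :: t, pvKeyLt al y (t.foldl (fun best y => if pvKeyLt al y best then y else best) x) = false) := by
  induction t generalizing x with
  | nil =>
    refine ⟨by simp, ?_⟩
    intro y hy; simp at hy; subst hy
    simp [pvKeyLt_eq]
  | cons z t ih =>
    simp only [List.foldl_cons]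
    by_cases hzx : pvKeyLt al z x = true
    · rw [if_pos hzx]
      obtain ⟨hmem, hmin⟩ := ih z
      refine ⟨by rcases List.mem_cons.1 hmem with h | h <;> simp [h], ?_⟩
      intro y hy
      rcases List.mem_cons.1 hy with rfl | hy'
      · have hz : pvKeyLt al z (t.foldl (fun best y => if pvKeyLt al y best then y else best) z) = false :=
          hmin z (by simp)
        rw [pvKeyLt_eq] at hzx hz ⊢
        simp only [decide_eq_true_eq, decide_eq_false_iff_not] at hzx hz ⊢
        intro hyr; exact hz (lt_trans hzx hyr)
      · exact hmin y hy'
    · rw [if_neg hzx]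
      obtain ⟨hmem, hmin⟩ := ih x
      refine ⟨by rcases List.mem_cons.1 hmem with h | h <;> simp [h], ?_⟩
      intro y hy
      rcases List.mem_cons.1 hy with rfl | hy'
      · exact hmin y (by simp)
      · rcases List.mem_cons.1 hy' with rfl | hy''
        · have hx : pvKeyLt al x (t.foldl (fun best y => if pvKeyLt al y best then y else best) x) = false :=
            hmin x (by simp)
          rw [pvKeyLt_eq] at hzx hx ⊢
          simp only [decide_eq_true_eq, decide_eq_false_iff_not] at hzx hx ⊢
          intro hyr
          exact hzx (lt_of_lt_of_le hyr (le_of_not_gt hx))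
        · exact hmin y (by simp [hy''])

lemma pv_mem_pvP_iff (artist : String) (L : List String) (f : String) :
    f ∈ pvP artist L ↔ f ∈ L ∧ pvCat (PySem.Str.lower artist) f = 0 := by
  simp only [pvP, List.mem_filter, Bool.and_eq_true]
  constructor
  · rintro ⟨hL, h1, h2⟩
    refine ⟨hL, ?_⟩
    unfold pvCat; rw [if_pos h1, if_pos h2]
  · rintro ⟨hL, hc⟩
    unfold pvCat at hc
    split_ifs at hc with hA hB
    · exact ⟨hL, hA, hB⟩

lemma pv_mem_pvW_iff (artist : String) (L : List String) (f : String) :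
    f ∈ pvW L ↔ f ∈ L ∧ pvCat (PySem.Str.lower artist) f ≤ 1 := by
  simp only [pvW, List.mem_filter]
  constructor
  · rintro ⟨hL, h1⟩
    refine ⟨hL, ?_⟩
    unfold pvCat; rw [if_pos h1]; split_ifs <;> omega
  · rintro ⟨hL, hc⟩
    refine ⟨hL, ?_⟩
    unfold pvCat at hc
    split_ifs at hc with hA hB
    · exact hA
    · exact hA
    · omega

-- head of a stable length-sort: a member of minimal key
lemma pv_sorted_head {κ : Type} [LinearOrder κ] (X : List String) (hne : X ≠ [])
    (key : String → κ) :
    ∃ m, (PySem.List.sorted X key false).head? = some m ∧ m ∈ X ∧ ∀ y ∈ X, key m ≤ key y := by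
  have hs : PySem.List.sorted X key false ≠ [] := by
    intro h; exact hne ((PySem.List.sorted_eq_nil_iff X key false).1 h)
  obtain ⟨m, t, hmt⟩ := List.exists_cons_of_ne_nil hs
  refine ⟨m, by rw [hmt]; rfl, ?_, ?_⟩
  · have : m ∈ PySem.List.sorted X key false := by rw [hmt]; exact List.mem_cons_self
    exact (PySem.List.mem_sorted X key false m).1 this
  · exact PySem.List.key_head_sorted_le X key hmt

-- simple facts about the category and the key comparison
lemma pvCat_le_two (al f : String) : pvCat al f ≤ 2 := by
  unfold pvCat; split_ifs <;> omega

lemma pvKeyLt_of_cat_lt (al f g : String) (h : pvCat al f < pvCat al g) :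
    pvKeyLt al f g = true := by
  unfold pvKeyLt
  rw [if_neg (by omega)]
  simpa using h

lemma pvKeyLt_len_eq (al f g : String) (h : pvCat al f = pvCat al g) (h2 : pvCat al f ≠ 2) :
    pvKeyLt al f g = decide (PySem.Str.len f < PySem.Str.len g) := by
  unfold pvKeyLt; rw [if_pos h, if_neg h2]

lemma pvKeyLt_str_eq (al f g : String) (h : pvCat al f = pvCat al g) (h2 : pvCat al f = 2) :
    pvKeyLt al f g = decide (f < g) := by
  unfold pvKeyLt; rw [if_pos h, if_pos h2]

-- B's selection, named so the equation below states cleanly (defeq to B's match)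
def pvMinScan (artist : String) (L : List String) : Option String :=
  match L with
  | [] => none
  | x :: t => some (t.foldl (fun best y => if pvKeyLt (PySem.Str.lower artist) y best then y else best) x)

-- the core: A's three-branch filter+sort selection equals B's single min() scan
lemma pvSelect_eq (artist : String) (L : List String)
    (h1 : pvP artist L ≠ [] → pvUniqMin (pvP artist L))
    (h2 : pvP artist L = [] → pvUniqMin (pvW L)) :
    (if pvP artist L ≠ [] then
      (PySem.List.sorted (pvP artist L) (fun f => PySem.Str.len f) false).head?
    else if pvW L ≠ [] then
      (PySem.List.sorted (pvW L) (fun f => PySem.Str.len f) false).head?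
    else if L ≠ [] then
      (PySem.List.sorted L (fun f => f) false).head?
    else none)
    = pvMinScan artist L := by
  cases L with
  | nil => simp [pvP, pvW, pvMinScan]
  | cons x t =>
    obtain ⟨hbmem, hbmin⟩ :=
      pvMinFold_spec (PySem.Str.lower artist) t x
    rw [show pvMinScan artist (x :: t)
        = some (t.foldl (fun best y => if pvKeyLt (PySem.Str.lower artist) y best then y else best) x) from rfl]
    set b := t.foldl (fun best y => if pvKeyLt (PySem.Str.lower artist) y best then y else best) x with hb
    by_cases hP : pvP artist (x :: t) ≠ []
    · rw [if_pos hP]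
      obtain ⟨m, hhead, hmP, hmin⟩ := pv_sorted_head (pvP artist (x :: t)) hP (fun f => PySem.Str.len f)
      rw [hhead]
      congr 1
      have hmL : m ∈ x :: t := ((pv_mem_pvP_iff artist (x :: t) m).1 hmP).1
      have hcm : pvCat (PySem.Str.lower artist) m = 0 := ((pv_mem_pvP_iff artist (x :: t) m).1 hmP).2
      have hmb : pvKeyLt (PySem.Str.lower artist) m b = false := hbmin m hmL
      have hcb : pvCat (PySem.Str.lower artist) b = 0 := by
        by_contra hne
        have : pvKeyLt (PySem.Str.lower artist) m b = true := pvKeyLt_of_cat_lt (PySem.Str.lower artist) m b (by omega)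
        rw [this] at hmb; cases hmb
      have hbP : b ∈ pvP artist (x :: t) := (pv_mem_pvP_iff artist (x :: t) b).2 ⟨hbmem, hcb⟩
      have hlenbm : PySem.Str.len b ≤ PySem.Str.len m := by
        rw [pvKeyLt_len_eq (PySem.Str.lower artist) m b (hcm.trans hcb.symm) (by omega)] at hmb
        simpa using hmb
      exact h1 hP m hmP b hbP hmin (fun y hy => le_trans hlenbm (hmin y hy))
    · push Not at hP
      rw [if_neg (by simpa using hP)]
      by_cases hW : pvW (x :: t) ≠ []
      · rw [if_pos hW]
        obtain ⟨m, hhead, hmW, hmin⟩ := pv_sorted_head (pvW (x :: t)) hW (fun f => PySem.Str.len f)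
        rw [hhead]
        congr 1
        have hmL : m ∈ x :: t := ((pv_mem_pvW_iff artist (x :: t) m).1 hmW).1
        have hcm1 : pvCat (PySem.Str.lower artist) m ≤ 1 := ((pv_mem_pvW_iff artist (x :: t) m).1 hmW).2
        have hcm : pvCat (PySem.Str.lower artist) m = 1 := by
          rcases Nat.lt_or_ge (pvCat (PySem.Str.lower artist) m) 1 with h | h
          · exfalso
            have : m ∈ pvP artist (x :: t) := (pv_mem_pvP_iff artist (x :: t) m).2 ⟨hmL, by omega⟩
            rw [hP] at this; cases this
          · omega
        have hmb : pvKeyLt (PySem.Str.lower artist) m b = false := hbmin m hmL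
        have hcb2 : pvCat (PySem.Str.lower artist) b ≠ 2 := by
          intro hne
          have : pvKeyLt (PySem.Str.lower artist) m b = true := pvKeyLt_of_cat_lt (PySem.Str.lower artist) m b (by omega)
          rw [this] at hmb; cases hmb
        have hcb0 : pvCat (PySem.Str.lower artist) b ≠ 0 := by
          intro hc0
          have : b ∈ pvP artist (x :: t) := (pv_mem_pvP_iff artist (x :: t) b).2 ⟨hbmem, hc0⟩
          rw [hP] at this; cases this
        have hcb : pvCat (PySem.Str.lower artist) b = 1 := by
          have := pvCat_le_two (PySem.Str.lower artist) b; omega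
        have hbW : b ∈ pvW (x :: t) := (pv_mem_pvW_iff artist (x :: t) b).2 ⟨hbmem, by omega⟩
        have hlenbm : PySem.Str.len b ≤ PySem.Str.len m := by
          rw [pvKeyLt_len_eq (PySem.Str.lower artist) m b (hcm.trans hcb.symm) (by omega)] at hmb
          simpa using hmb
        exact h2 hP m hmW b hbW hmin (fun y hy => le_trans hlenbm (hmin y hy))
      · push Not at hW
        rw [if_neg (by simpa using hW), if_pos (by simp : (x :: t : List String) ≠ [])]
        obtain ⟨m, hhead, hmL, hmin⟩ := pv_sorted_head (x :: t) (by simp) (fun f => f)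
        rw [hhead]
        congr 1
        have hcall : ∀ f ∈ (x :: t : List String), pvCat (PySem.Str.lower artist) f = 2 := by
          intro f hf
          rcases Nat.lt_or_ge (pvCat (PySem.Str.lower artist) f) 2 with h | h
          · exfalso
            have : f ∈ pvW (x :: t) := (pv_mem_pvW_iff artist (x :: t) f).2 ⟨hf, by omega⟩
            rw [hW] at this; cases this
          · have := pvCat_le_two (PySem.Str.lower artist) f; omega
        have hmb : pvKeyLt (PySem.Str.lower artist) m b = false := hbmin m hmL
        rw [pvKeyLt_str_eq (PySem.Str.lower artist) m b ((hcall m hmL).trans (hcall b hbmem).symm) (hcall m hmL)] at hmb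
        have hbm : b ≤ m := by simpa using hmb
        exact le_antisymm (hmin b hbmem) hbm

-- ===== VERDICT (by name: the statement is the Claim_ definition above) =====
theorem determine_target_book_folder_spec : Claim_equal_determine_target_book_folder := by
  intro artist keys _hdom hpre
  unfold Spec_determine_target_book_folder
  show determine_target_book_folder artist keys = determine_target_book_folder_alt artist keys
  unfold determine_target_book_folder determine_target_book_folder_alt
  simp only [pvFoldA_eq]
  exact pvSelect_eq artist (pvFolders keys) hpre.1 hpre.2
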